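-- pv_equiv track=rewrite | github.com/not-a-feature/markov-polymerlen-sampling | markov_chain_polymer_sampling.py | length_distribution
-- ===== SOURCE A (Python) =====
-- from collections import defaultdict
--
-- def length_distribution(states, trajectory):
--     # Initialize the lengths dictionary
--     lengths = {k: defaultdict(int) for k in states}
--
--     # Initialize the current state and length
--     current_state = trajectory[0]
--     current_length = 1
--
--     # Iterate over the trajectory to compute the lengths
--     for state in trajectory[1:]:
--         if state == current_state:
--             current_length += 1
--         else:
--             lengths[current_state][current_length] += 1
--             current_length = 1
--             current_state = state
--
--     # Update the last length
--     lengths[current_state][current_length] += 1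
--
--     return lengths
-- ===== SOURCE B (Python) =====
-- from collections import defaultdict
--
-- def change_points(trajectory):
--     """Indices i where the trajectory switches state (trajectory[i] != trajectory[i-1])."""
--     return [i for i in range(1, len(trajectory)) if trajectory[i] != trajectory[i - 1]]
--
-- def length_distribution(states, trajectory):
--     lengths = {k: defaultdict(int) for k in states}
--     # run boundaries: 0, every change point, and the end of the trajectory;
--     # each consecutive pair (start, stop) delimits one maximal run
--     edges = [0] + change_points(trajectory) + [len(trajectory)]
--     for start, stop in zip(edges, edges[1:]):
--         lengths[trajectory[start]][stop - start] += 1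
--     return lengths
-- ===== Notes on version B (the rewrite author's own statement) =====
-- stated objective: alternative
-- what changed: B drops A's streaming (current_state, current_length) accumulator entirely: it first computes the list of change-point indices of the trajectory, forms the boundary list [0]+changes+[n], and then reads each run as the pairwise difference of consecutive boundaries, bumping lengths[trajectory[start]][stop-start].
import Mathlib
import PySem

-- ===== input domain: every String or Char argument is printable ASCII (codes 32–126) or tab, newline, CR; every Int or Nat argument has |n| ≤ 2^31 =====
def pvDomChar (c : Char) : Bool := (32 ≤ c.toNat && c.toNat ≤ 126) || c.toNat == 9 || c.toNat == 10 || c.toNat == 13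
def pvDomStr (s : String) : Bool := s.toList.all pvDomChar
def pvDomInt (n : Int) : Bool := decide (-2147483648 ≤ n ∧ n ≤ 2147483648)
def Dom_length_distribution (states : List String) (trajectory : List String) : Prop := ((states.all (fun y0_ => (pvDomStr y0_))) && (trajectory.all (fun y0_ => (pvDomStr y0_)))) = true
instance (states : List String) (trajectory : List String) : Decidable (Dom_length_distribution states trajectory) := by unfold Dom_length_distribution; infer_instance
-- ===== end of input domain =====

-- B replaces A's streaming (current_state, current_length) accumulator by change-point indices:
-- runs are read off as pairwise differences of the boundary list [0] + changes + [n]. Same cost.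

-- shared plumbing: both Pythons build the same initial dict {k: defaultdict(int) for k in states},
-- do lengths[state][n] += 1 the same way, and return the same dict-of-dicts structure
def pvInit (states : List String) : PySem.Dict String (PySem.Dict Int Int) :=
  states.foldl (fun d k => d.insert k PySem.Dict.empty) PySem.Dict.empty

-- lengths[state][n] += 1  (state present under Pre_; inner dict is a defaultdict(int))
def pvBump (L : PySem.Dict String (PySem.Dict Int Int)) (s : String) (n : Int) :
    PySem.Dict String (PySem.Dict Int Int) :=
  L.modify s PySem.Dict.empty (fun d => d.modify n 0 (· + 1))

def pvToItems (L : PySem.Dict String (PySem.Dict Int Int)) : List (String × List (Int × Int)) :=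
  L.items.map (fun p => (p.1, p.2.items))

-- ===== PORT A =====
-- A's for-loop over trajectory[1:] carrying (current_state, current_length)
def pvLoopA (L : PySem.Dict String (PySem.Dict Int Int)) (cs : String) (cl : Int) :
    List String → PySem.Dict String (PySem.Dict Int Int)
  | [] => pvBump L cs cl                       -- the final  lengths[current_state][current_length] += 1
  | s :: rest =>
      if s == cs then pvLoopA L cs (cl + 1) rest
      else pvLoopA (pvBump L cs cl) s 1 rest

def length_distribution (states : List String) (trajectory : List String) : List (String × List (Int × Int)) :=
  let lengths := pvInit states
  match trajectory with
  | [] => pvToItems lengths                    -- Python raises IndexError on trajectory[0]; excluded by Pre_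
  | h :: t => pvToItems (pvLoopA lengths h 1 t)

-- ===== PORT B =====
-- [i for i in range(1, len(t)) if t[i] != t[i-1]]; indices in range(1,n) are valid, so t[i] = getD i ""
def pvChanges (t : List String) : List Nat :=
  (List.range' 1 (t.length - 1)).filter (fun i => t.getD i "" != t.getD (i - 1) "")

def length_distribution_alt (states : List String) (trajectory : List String) : List (String × List (Int × Int)) :=
  let lengths := pvInit states
  let edges := 0 :: pvChanges trajectory ++ [trajectory.length]   -- [0] + change_points(trajectory) + [len(trajectory)]
  pvToItems ((edges.zip edges.tail).foldl
    (fun L p => pvBump L (trajectory.getD p.1 "") ((p.2 - p.1 : Nat) : Int)) lengths)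

-- ===== PRECONDITION & SPEC =====
-- Pre_ excludes exactly the inputs where Python A raises: the empty trajectory (IndexError on
-- trajectory[0]) and trajectories containing a state not in `states` (KeyError on lengths[state]);
-- Python B raises the same exceptions on the same inputs.
def Pre_length_distribution (states : List String) (trajectory : List String) : Prop :=
  trajectory ≠ [] ∧ ∀ s ∈ trajectory, s ∈ states
instance (states : List String) (trajectory : List String) : Decidable (Pre_length_distribution states trajectory) := by unfold Pre_length_distribution; infer_instance
def pvWitness_length_distribution : List String × List String := (["a", "b"], ["a", "a", "b", "a"])

def Spec_length_distribution (states : List String) (trajectory : List String) (out : List (String × List (Int × Int))) : Prop := out = length_distribution_alt states trajectory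
instance (states : List String) (trajectory : List String) (out : List (String × List (Int × Int))) : Decidable (Spec_length_distribution states trajectory out) := by unfold Spec_length_distribution; infer_instance

-- ===== CLAIM (what is proved, stated in full; the proofs are below) =====
def Claim_equal_length_distribution : Prop := ∀ (states : List String) (trajectory : List String), Dom_length_distribution states trajectory → Pre_length_distribution states trajectory → Spec_length_distribution states trajectory (length_distribution states trajectory)

-- ===== LEMMAS AND PROOFS =====

-- the run-length encoding of the trajectory: the common characterisation both ports are reduced to
def pvRuns : List String → List (String × Int)
  | [] => []
  | x :: xs =>
      (x, 1 + ((xs.takeWhile (· == x)).length : Int)) :: pvRuns (xs.dropWhile (· == x))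
  termination_by l => l.length
  decreasing_by simpa [Nat.lt_succ_iff] using List.length_dropWhile_le (· == x) xs

-- run-length encoding of cs^cl ++ rest, element by element (mirrors A's loop structure)
def pvRF (cs : String) (cl : Int) : List String → List (String × Int)
  | [] => [(cs, cl)]
  | s :: rest => if s == cs then pvRF cs (cl + 1) rest else (cs, cl) :: pvRF s 1 rest

theorem pvLoopA_eq (rest : List String) : ∀ (L : PySem.Dict String (PySem.Dict Int Int)) (cs : String) (cl : Int),
    pvLoopA L cs cl rest = (pvRF cs cl rest).foldl (fun L p => pvBump L p.1 p.2) L := by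
  induction rest with
  | nil => intro L cs cl; simp [pvLoopA, pvRF]
  | cons s rest ih =>
      intro L cs cl
      by_cases h : (s == cs) = true <;> simp [pvLoopA, pvRF, h, ih]

theorem pvRF_eq (t : List String) : ∀ (cs : String) (cl : Int),
    pvRF cs cl t = (cs, cl + ((t.takeWhile (· == cs)).length : Int)) :: pvRuns (t.dropWhile (· == cs)) := by
  induction t with
  | nil => intro cs cl; simp [pvRF, pvRuns]
  | cons s rest ih =>
      intro cs cl
      by_cases h : (s == cs) = true
      · have hs : s = cs := by simpa using h
        subst hs
        rw [pvRF, if_pos h, ih _ (cl + 1), List.takeWhile_cons, List.dropWhile_cons]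
        simp
        ring
      · rw [pvRF, if_neg h, ih s 1, List.takeWhile_cons, List.dropWhile_cons]
        simp [h, pvRuns]

theorem pvRuns_cons (h : String) (t : List String) : pvRuns (h :: t) = pvRF h 1 t := by
  rw [pvRF_eq]; simp [pvRuns]

-- B-side: the pairs (start, stop-start) read from the edge list, as (state, length) pairs
def pvPairs (t : List String) : List (String × Int) :=
  ((0 :: pvChanges t ++ [t.length]).zip (pvChanges t ++ [t.length])).map
    (fun p => (t.getD p.1 "", ((p.2 - p.1 : Nat) : Int)))

theorem pvChanges_cons (h r : String) (rest : List String) :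
    pvChanges (h :: r :: rest) =
      (if r == h then [] else [1]) ++ (pvChanges (r :: rest)).map (· + 1) := by
  have hmap : List.range' 2 rest.length = (List.range' 1 rest.length).map (fun i => 1 + i) :=
    by simpa using (List.map_add_range' (a := 1) 1 rest.length 1).symm
  have hcong : (List.range' 1 rest.length).filter
        ((fun i => (h::r::rest).getD i "" != (h::r::rest).getD (i-1) "") ∘ (fun i => 1+i))
      = (List.range' 1 rest.length).filter (fun i => (r::rest).getD i "" != (r::rest).getD (i-1) "") := by
    apply List.filter_congr
    intro i hi
    obtain ⟨j, rfl⟩ : ∃ j, i = j + 1 := ⟨i-1, by have := (List.mem_range'_1.mp hi).1; omega⟩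
    have e1 : 1 + (j + 1) = j + 1 + 1 := by omega
    have e2 : 1 + (j + 1) - 1 = j + 1 := by omega
    simp [e1]
  unfold pvChanges
  simp only [List.length_cons, Nat.add_sub_cancel, List.range'_succ, List.filter_cons, hmap,
    List.filter_map, hcong]
  by_cases hr : r = h
  · simp [hr, Nat.add_comm]
  · simp [hr, Nat.add_comm]


theorem pvChanges_run (rest : List String) : ∀ (h : String),
    pvChanges (h :: rest) =
      if (rest.dropWhile (· == h)) = [] then []
      else (1 + (rest.takeWhile (· == h)).length) ::
           (pvChanges (rest.dropWhile (· == h))).map (· + (1 + (rest.takeWhile (· == h)).length)) := by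
  induction rest with
  | nil => intro h; simp [pvChanges]
  | cons r rest' ih =>
      intro h
      rw [pvChanges_cons]
      by_cases hr : r = h
      · subst hr
        rw [ih r]
        by_cases hd : rest'.dropWhile (· == r) = []
        · simp [hd]
        · simp [hd, List.map_map, Nat.add_comm]
      · simp [hr]

theorem pvPairs_shift (t : List String) (k : Nat) (L M : List Nat) :
    ((L.map (· + k)).zip (M.map (· + k))).map
        (fun p => (t.getD p.1 "", ((p.2 - p.1 : Nat) : Int)))
      = (L.zip M).map (fun p => ((t.drop k).getD p.1 "", ((p.2 - p.1 : Nat) : Int))) := by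
  rw [List.zip_map, List.map_map]
  refine List.map_congr_left ?_
  intro p _
  cases p with
  | mk a b =>
      simp [Prod.map, List.getD_eq_getElem?_getD, List.getElem?_drop, Nat.add_comm]
      omega

theorem pvPairs_cons (h : String) (rest : List String) (hd : rest.dropWhile (· == h) ≠ []) :
    pvPairs (h :: rest) =
      (h, ((1 + (rest.takeWhile (· == h)).length : Nat) : Int)) :: pvPairs (rest.dropWhile (· == h)) := by
  have hsplit : rest.takeWhile (· == h) ++ rest.dropWhile (· == h) = rest :=
    List.takeWhile_append_dropWhile
  set tw := rest.takeWhile (· == h) with htw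
  set d := rest.dropWhile (· == h) with hdw
  set k : Nat := 1 + tw.length with hk
  have hlen : (h :: rest).length = k + d.length := by
    have : tw.length + d.length = rest.length := by rw [← List.length_append, hsplit]
    simp [hk]; omega
  have hdropk : (h :: rest).drop k = d := by
    have h1 : (h :: rest).drop k = rest.drop tw.length := by
      rw [hk, Nat.add_comm]; simp [List.drop_succ_cons]
    rw [h1, ← hsplit, List.drop_left]
  have hchg : pvChanges (h :: rest) = k :: (pvChanges d).map (· + k) := by
    rw [pvChanges_run rest h, if_neg hd]
  have hA : k :: ((pvChanges d).map (· + k) ++ [k + d.length])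
      = ((0 :: pvChanges d) ++ [d.length]).map (· + k) := by
    simp [Nat.add_comm]
  have hB : (pvChanges d).map (· + k) ++ [k + d.length]
      = (pvChanges d ++ [d.length]).map (· + k) := by
    simp [Nat.add_comm]
  rw [pvPairs, hchg, hlen]
  rw [List.cons_append, List.cons_append, List.zip_cons_cons, List.map_cons]
  rw [hA, hB, pvPairs_shift, hdropk]
  simp [pvPairs]

theorem pvPairs_single (h : String) (rest : List String) (hd : rest.dropWhile (· == h) = []) :
    pvPairs (h :: rest) = [(h, ((1 + (rest.takeWhile (· == h)).length : Nat) : Int))] := by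
  have htw : rest.takeWhile (· == h) = rest := by
    have := List.takeWhile_append_dropWhile (p := (· == h)) (l := rest)
    rwa [hd, List.append_nil] at this
  have hchg : pvChanges (h :: rest) = [] := by rw [pvChanges_run rest h, if_pos hd]
  simp [pvPairs, hchg, htw, Nat.add_comm]

theorem pvPairs_eq_runs (n : Nat) : ∀ (t : List String), t.length ≤ n → t ≠ [] → pvPairs t = pvRuns t := by
  induction n with
  | zero => intro t hlen hne; cases t with
    | nil => exact absurd rfl hne
    | cons a b => simp at hlen
  | succ n ih =>
      intro t hlen hne
      match t with
      | h :: rest =>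
        by_cases hd : rest.dropWhile (· == h) = []
        · rw [pvPairs_single h rest hd]
          simp [pvRuns, hd]
        · rw [pvPairs_cons h rest hd,
            ih _ (le_trans (List.length_dropWhile_le _ _) (by simpa using hlen)) hd]
          simp [pvRuns]

-- ===== VERDICT (by name: the statement is the Claim_ definition above) =====
theorem length_distribution_spec : Claim_equal_length_distribution := by
  intro states trajectory _dom hpre
  unfold Spec_length_distribution
  obtain ⟨hne, -⟩ := hpre
  have hB : length_distribution_alt states trajectory
      = pvToItems ((pvPairs trajectory).foldl (fun L p => pvBump L p.1 p.2) (pvInit states)) := by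
    simp [length_distribution_alt, pvPairs, List.foldl_map]
  cases trajectory with
  | nil => exact absurd rfl hne
  | cons h t =>
      rw [hB, length_distribution, pvPairs_eq_runs (h :: t).length _ le_rfl (by simp),
        pvRuns_cons, pvLoopA_eq]
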